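-- pv_equiv track=rewrite | github.com/guankaisi/learning-to-rank | learning_to_rank/utils.py | split_pairs
-- ===== SOURCE A (Python) =====
-- def split_pairs(order_pairs, true_scores):
--     """
--     split the pairs into two list, named relevant_doc and irrelevant_doc.
--     relevant_doc[i] is prior to irrelevant_doc[i]
--
--     :param order_pairs: ordered pairs of all queries
--     :param ture_scores: scores of docs for each query
--     :return: relevant_doc and irrelevant_doc
--     """
--     relevant_doc = []
--     irrelevant_doc = []
--     doc_idx_base = 0
--     query_num = len(order_pairs)
--     for i in range(query_num):
--         pair_num = len(order_pairs[i])
--         docs_num = len(true_scores[i])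
--         for j in range(pair_num):
--             d1, d2 = order_pairs[i][j]
--             d1 += doc_idx_base
--             d2 += doc_idx_base
--             relevant_doc.append(d1)
--             irrelevant_doc.append(d2)
--         doc_idx_base += docs_num
--     return relevant_doc, irrelevant_doc
-- ===== SOURCE B (Python) =====
-- def split_pairs(order_pairs, true_scores):
--     n = len(order_pairs)
--     offsets = [0]
--     for i in range(1, n):
--         offsets.append(offsets[-1] + len(true_scores[i - 1]))
--     relevant_doc = [off + d1 for off, pairs in zip(offsets, order_pairs) for d1, _ in pairs]
--     irrelevant_doc = [off + d2 for off, pairs in zip(offsets, order_pairs) for _, d2 in pairs]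
--     return relevant_doc, irrelevant_doc
-- ===== Notes on version B (the rewrite author's own statement) =====
-- stated objective: alternative
-- what changed: Replaces the single nested loop threading a running doc_idx_base accumulator by first building an explicit prefix-offset table from the true_scores lengths and then emitting the two index lists with flattened comprehensions over zip(offsets, order_pairs).
import Mathlib
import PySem

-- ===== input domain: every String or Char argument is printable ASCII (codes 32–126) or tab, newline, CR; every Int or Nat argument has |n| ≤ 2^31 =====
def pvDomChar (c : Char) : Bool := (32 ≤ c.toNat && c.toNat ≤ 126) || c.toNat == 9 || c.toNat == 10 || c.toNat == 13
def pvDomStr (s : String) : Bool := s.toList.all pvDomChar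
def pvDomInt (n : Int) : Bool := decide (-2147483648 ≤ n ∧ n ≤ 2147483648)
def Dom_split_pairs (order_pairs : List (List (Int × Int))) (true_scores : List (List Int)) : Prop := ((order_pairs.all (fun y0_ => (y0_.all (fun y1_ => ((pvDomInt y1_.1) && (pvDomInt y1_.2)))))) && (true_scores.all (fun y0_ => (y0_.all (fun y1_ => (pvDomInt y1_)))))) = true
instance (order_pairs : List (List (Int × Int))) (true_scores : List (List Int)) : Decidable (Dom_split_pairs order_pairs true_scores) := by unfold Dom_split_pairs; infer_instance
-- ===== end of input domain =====

-- B builds an explicit prefix-offset table from true_scores lengths, then emits both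
-- index lists with flattened comprehensions over zip(offsets, order_pairs) — an
-- alternative decomposition of A's single nested loop with a running accumulator.


-- ===== PORT A =====
-- literal transliteration of A: one pass over query indices, nested pass over the
-- query's pairs, threading (relevant_doc, irrelevant_doc, doc_idx_base).
-- pyGet? …getD is exact on Pre_ (indices in range; Pre_ excludes the IndexError inputs).
def split_pairs (order_pairs : List (List (Int × Int))) (true_scores : List (List Int)) : List Int × List Int :=
  let query_num : Int := order_pairs.length
  let st :=
    (PySem.List.pyRange 0 query_num 1).foldl
      (fun (st : List Int × List Int × Int) i =>
        let opi := PySem.List.pyGetD order_pairs i []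
        let pair_num : Int := opi.length
        let docs_num : Int := (PySem.List.pyGetD true_scores i []).length
        let st2 :=
          (PySem.List.pyRange 0 pair_num 1).foldl
            (fun (st : List Int × List Int × Int) j =>
              let d := PySem.List.pyGetD opi j (0, 0)
              (st.1 ++ [d.1 + st.2.2], st.2.1 ++ [d.2 + st.2.2], st.2.2))
            st
        (st2.1, st2.2.1, st2.2.2 + docs_num))
      ([], [], 0)
  (st.1, st.2.1)

-- ===== PORT B =====
-- literal transliteration of Source B: build the offsets table, then two flatMaps over
-- zip(offsets, order_pairs).  offsets[-1] is pyGetD offsets (-1) (never hit on []).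
def split_pairs_alt (order_pairs : List (List (Int × Int))) (true_scores : List (List Int)) : List Int × List Int :=
  let n : Int := order_pairs.length
  let offsets :=
    (PySem.List.pyRange 1 n 1).foldl
      (fun (offsets : List Int) i =>
        offsets ++ [PySem.List.pyGetD offsets (-1) 0 + (PySem.List.pyGetD true_scores (i - 1) []).length])
      [0]
  let relevant_doc := (offsets.zip order_pairs).flatMap (fun p => p.2.map (fun d => p.1 + d.1))
  let irrelevant_doc := (offsets.zip order_pairs).flatMap (fun p => p.2.map (fun d => p.1 + d.2))
  (relevant_doc, irrelevant_doc)

-- ===== PRECONDITION & SPEC =====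
-- A indexes true_scores[i] for every i < len(order_pairs), so it raises IndexError
-- exactly when true_scores is shorter than order_pairs; Pre_ is exactly A's return set.
def Pre_split_pairs (order_pairs : List (List (Int × Int))) (true_scores : List (List Int)) : Prop :=
  order_pairs.length ≤ true_scores.length
instance (order_pairs : List (List (Int × Int))) (true_scores : List (List Int)) : Decidable (Pre_split_pairs order_pairs true_scores) := by unfold Pre_split_pairs; infer_instance
def pvWitness_split_pairs : (List (List (Int × Int))) × List (List Int) :=
  ([[(0, 1), (2, 1)], [(1, 0)]], [[3, 1], [2, 5]])

def Spec_split_pairs (order_pairs : List (List (Int × Int))) (true_scores : List (List Int)) (out : List Int × List Int) : Prop := out = split_pairs_alt order_pairs true_scores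
instance (order_pairs : List (List (Int × Int))) (true_scores : List (List Int)) (out : List Int × List Int) : Decidable (Spec_split_pairs order_pairs true_scores out) := by unfold Spec_split_pairs; infer_instance

-- ===== CLAIM (what is proved, stated in full; the proofs are below) =====
def Claim_equal_split_pairs : Prop := ∀ (order_pairs : List (List (Int × Int))) (true_scores : List (List Int)), Dom_split_pairs order_pairs true_scores → Pre_split_pairs order_pairs true_scores → Spec_split_pairs order_pairs true_scores (split_pairs order_pairs true_scores)

-- ===== LEMMAS AND PROOFS =====

-- offset of query k: total number of docs of the earlier queries
def pvOff (true_scores : List (List Int)) (k : Nat) : Int :=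
  ((true_scores.take k).map (fun t => (t.length : Int))).sum

-- the common closed form both programs are reduced to
def pvRel (order_pairs : List (List (Int × Int))) (true_scores : List (List Int)) : List Int :=
  (List.range order_pairs.length).flatMap
    (fun k => (order_pairs.getD k []).map (fun d => pvOff true_scores k + d.1))
def pvIrr (order_pairs : List (List (Int × Int))) (true_scores : List (List Int)) : List Int :=
  (List.range order_pairs.length).flatMap
    (fun k => (order_pairs.getD k []).map (fun d => pvOff true_scores k + d.2))

theorem pvOff_succ (ts : List (List Int)) (k : Nat) (hk : k < ts.length) :
    pvOff ts (k + 1) = pvOff ts k + ((ts.getD k []).length : Int) := by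
  unfold pvOff
  rw [List.map_take, List.map_take, List.sum_take_succ _ k (by simpa using hk)]
  simp [List.getD, List.getElem?_eq_getElem hk]

def pvStep (st : List Int × List Int × Int) (d : Int × Int) : List Int × List Int × Int :=
  (st.1 ++ [d.1 + st.2.2], st.2.1 ++ [d.2 + st.2.2], st.2.2)

theorem innerA_fold (o : List (Int × Int)) :
    ∀ (st : List Int × List Int × Int),
      o.foldl pvStep st
        = (st.1 ++ o.map (fun d => st.2.2 + d.1), st.2.1 ++ o.map (fun d => st.2.2 + d.2), st.2.2) := by
  induction o with
  | nil => intro st; simp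
  | cons d o ih =>
    intro st
    simp only [List.foldl_cons, List.map_cons]
    rw [ih]
    simp [pvStep, Int.add_comm]

-- A's inner loop over one query's pairs
theorem innerA (o : List (Int × Int)) (st : List Int × List Int × Int) :
      (PySem.List.pyRange 0 (o.length : Int) 1).foldl
          (fun (st : List Int × List Int × Int) j =>
            let d := PySem.List.pyGetD o j (0, 0)
            (st.1 ++ [d.1 + st.2.2], st.2.1 ++ [d.2 + st.2.2], st.2.2))
          st
        = (st.1 ++ o.map (fun d => st.2.2 + d.1), st.2.1 ++ o.map (fun d => st.2.2 + d.2), st.2.2) := by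
  have h1 :
      (PySem.List.pyRange 0 (o.length : Int) 1).foldl
          (fun (st : List Int × List Int × Int) j =>
            let d := PySem.List.pyGetD o j (0, 0)
            (st.1 ++ [d.1 + st.2.2], st.2.1 ++ [d.2 + st.2.2], st.2.2))
          st
        = o.foldl pvStep st :=
    PySem.List.foldl_pyRange_zero_pyGetD' o (0, 0) pvStep st
  rw [h1, innerA_fold]

-- A's outer loop up to query n, as a closed form
theorem outerA (op : List (List (Int × Int))) (ts : List (List Int))
    (hlen : op.length ≤ ts.length) :
    ∀ n : Nat, n ≤ op.length →
      (PySem.List.pyRange 0 (n : Int) 1).foldl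
          (fun (st : List Int × List Int × Int) i =>
            let opi := PySem.List.pyGetD op i []
            let st2 :=
              (PySem.List.pyRange 0 ((opi.length : Int)) 1).foldl
                (fun (st : List Int × List Int × Int) j =>
                  let d := PySem.List.pyGetD opi j (0, 0)
                  (st.1 ++ [d.1 + st.2.2], st.2.1 ++ [d.2 + st.2.2], st.2.2))
                st
            (st2.1, st2.2.1, st2.2.2 + ((PySem.List.pyGetD ts i []).length : Int)))
          ([], [], 0)
        = ((List.range n).flatMap (fun k => (op.getD k []).map (fun d => pvOff ts k + d.1)),
           (List.range n).flatMap (fun k => (op.getD k []).map (fun d => pvOff ts k + d.2)),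
           pvOff ts n) := by
  intro n
  induction n with
  | zero => intro _; simp [pvOff]
  | succ n ih =>
    intro hn
    have hn' : n ≤ op.length := Nat.le_of_succ_le hn
    have hnop : n < op.length := hn
    have hnts : n < ts.length := lt_of_lt_of_le hnop hlen
    have hstep : PySem.List.pyRange 0 ((n + 1 : Nat) : Int) 1
        = PySem.List.pyRange 0 (n : Int) 1 ++ [(n : Int)] := by
      have := PySem.List.pyRange_one_succ_right (a := 0) (b := (n : Int)) (by positivity)
      simpa using this
    rw [hstep, List.foldl_append, ih hn']
    simp only [List.foldl_cons, List.foldl_nil]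
    rw [PySem.List.pyGetD_natCast, PySem.List.pyGetD_natCast, innerA]
    rw [pvOff_succ ts n hnts]
    simp only [List.range_succ, List.flatMap_append, List.flatMap_cons, List.flatMap_nil,
      List.append_nil]

-- B's offsets table equals the prefix-offset closed form (for 1 ≤ n ≤ |ts|+1)
theorem offsetsB (ts : List (List Int)) :
    ∀ n : Nat, 1 ≤ n → n ≤ ts.length + 1 →
      (PySem.List.pyRange 1 (n : Int) 1).foldl
          (fun (offsets : List Int) i =>
            offsets ++ [PySem.List.pyGetD offsets (-1) 0 + ((PySem.List.pyGetD ts (i - 1) []).length : Int)])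
          [0]
        = (List.range n).map (fun k => pvOff ts k) := by
  intro n
  induction n with
  | zero => intro h; omega
  | succ n ih =>
    intro _ hn
    by_cases h1 : 1 ≤ n
    · have hstep : PySem.List.pyRange 1 ((n + 1 : Nat) : Int) 1
          = PySem.List.pyRange 1 (n : Int) 1 ++ [(n : Int)] := by
        have := PySem.List.pyRange_one_succ_right (a := 1) (b := (n : Int)) (by exact_mod_cast h1)
        simpa using this
      rw [hstep, List.foldl_append, ih h1 (by omega)]
      simp only [List.foldl_cons, List.foldl_nil]
      have hlast : PySem.List.pyGetD ((List.range n).map (fun k => pvOff ts k)) (-1) 0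
          = pvOff ts (n - 1) := by
        simp only [PySem.List.pyGetD, PySem.List.pyGet?, PySem.List.pyIdx?]
        have hc : -((((List.range n).map (fun k => pvOff ts k)).length : Nat) : Int) ≤ -1 := by
          simp; omega
        rw [if_pos hc]
        have h3 : ((List.range n).map (fun k => pvOff ts k)).length - ((-(-1) : Int)).toNat
            = n - 1 := by simp
        rw [h3]
        have hlt : n - 1 < n := by omega
        simp [hlt]
      rw [hlast]
      have hts : PySem.List.pyGetD ts ((n : Int) - 1) [] = ts.getD (n - 1) [] := by
        have h4 : ((n : Int) - 1) = ((n - 1 : Nat) : Int) := by omega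
        rw [h4, PySem.List.pyGetD_natCast]
      rw [hts]
      have hoff : pvOff ts (n - 1) + ((ts.getD (n - 1) []).length : Int) = pvOff ts n := by
        have hlt : n - 1 < ts.length := by omega
        have h5 := pvOff_succ ts (n - 1) hlt
        have hsn : n - 1 + 1 = n := by omega
        rw [hsn] at h5
        omega
      rw [hoff, List.range_succ, List.map_append, List.map_cons, List.map_nil]
    · have hn0 : n = 0 := by omega
      subst hn0
      simp [PySem.List.pyRange_one_eq_nil, List.range_succ, pvOff]

-- zip of the offsets table with order_pairs, flattened, equals the closed form
theorem zipB (op : List (List (Int × Int))) (f : Nat → Int) (g : Int × List (Int × Int) → List Int) :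
    ((((List.range op.length).map f).zip op).flatMap g)
      = (List.range op.length).flatMap (fun k => g (f k, op.getD k [])) := by
  have hzip : ((List.range op.length).map f).zip op
      = (List.range op.length).map (fun k => (f k, op.getD k [])) := by
    apply List.ext_getElem
    · simp
    · intro i h1 h2
      have hi : i < op.length := by simpa using h2
      simp [List.getElem_zip, List.getD, List.getElem?_eq_getElem hi]
  rw [hzip, List.flatMap_map]

theorem split_pairs_closed (op : List (List (Int × Int))) (ts : List (List Int))
    (hlen : op.length ≤ ts.length) :
    split_pairs op ts = (pvRel op ts, pvIrr op ts) :=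
  congrArg (fun st : List Int × List Int × Int => (st.1, st.2.1))
    (outerA op ts hlen op.length le_rfl)

theorem split_pairs_alt_closed (op : List (List (Int × Int))) (ts : List (List Int))
    (hlen : op.length ≤ ts.length) :
    split_pairs_alt op ts = (pvRel op ts, pvIrr op ts) := by
  by_cases h0 : op = []
  · subst h0; rfl
  · have h1 : 1 ≤ op.length := by
      cases op with
      | nil => exact absurd rfl h0
      | cons a l => simp
    have h2 : split_pairs_alt op ts
        = (((((List.range op.length).map (fun k => pvOff ts k)).zip op).flatMap
              (fun p => p.2.map (fun d => p.1 + d.1))),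
           ((((List.range op.length).map (fun k => pvOff ts k)).zip op).flatMap
              (fun p => p.2.map (fun d => p.1 + d.2)))) :=
      congrArg
        (fun offsets : List Int =>
          ((offsets.zip op).flatMap (fun p => p.2.map (fun d => p.1 + d.1)),
           (offsets.zip op).flatMap (fun p => p.2.map (fun d => p.1 + d.2))))
        (offsetsB ts op.length h1 (by omega))
    rw [h2, zipB op (fun k => pvOff ts k) (fun p => p.2.map (fun d => p.1 + d.1)),
        zipB op (fun k => pvOff ts k) (fun p => p.2.map (fun d => p.1 + d.2))]
    rfl

-- ===== VERDICT (by name: the statement is the Claim_ definition above) =====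
theorem split_pairs_spec : Claim_equal_split_pairs := by
  intro op ts _ hpre
  unfold Spec_split_pairs
  rw [split_pairs_closed op ts hpre, split_pairs_alt_closed op ts hpre]
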